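-- pv_equiv track=rewrite | github.com/OliverJessen/AI-HC-Project1 | fix_csv_format.py | fix_csv_line
-- ===== SOURCE A (Python) =====
-- def fix_csv_line(line):
--     """
--     Convert a CSV line from incorrect format to correct format.
--
--     Handles various input formats:
--     1. "[word, word, word]","[word, word, word]" -> "['word', 'word', 'word']","['word', 'word', 'word']"
--     2. "[word, word, word]",[word word word] -> "['word', 'word', 'word']","['word', 'word', 'word']"
--     """
--
--     line = line.strip()
--     if not line or line.startswith('trial'):  # Skip header and empty lines
--         return line
--
--     # Check if line is already properly formatted (contains single quotes around words)
--     if "[''" in line or "['" in line: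
--         return line  # Already properly formatted, don't reprocess
--
--     # Split the line carefully to handle quoted sections
--     parts = []
--     current_part = ""
--     in_quotes = False
--
--     for char in line:
--         if char == '"':
--             in_quotes = not in_quotes
--             current_part += char
--         elif char == ',' and not in_quotes:
--             parts.append(current_part.strip())
--             current_part = ""
--         else:
--             current_part += char
--
--     if current_part:
--         parts.append(current_part.strip())
--
--     if len(parts) < 4:
--         return line  # Return unchanged if format is unexpected
--
--     trial_id = parts[0]
--     condition = parts[1]
--     presented_part = parts[2]
--     recalled_part = parts[3]
--
--     # Fix presented words
--     presented_fixed = fix_word_list(presented_part)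
--
--     # Fix recalled words
--     recalled_fixed = fix_word_list(recalled_part)
--
--     # Reconstruct the line
--     fixed_line = f'{trial_id},{condition},{presented_fixed},{recalled_fixed}'
--     return fixed_line
--
-- def fix_word_list(word_part):
--     """
--     Fix a word list part, handling both quoted and unquoted formats.
--     """
--     word_part = word_part.strip()
--
--     # Remove outer quotes if present
--     if word_part.startswith('"') and word_part.endswith('"'):
--         inner_content = word_part[1:-1]
--     else:
--         inner_content = word_part
--
--     # Handle bracketed lists
--     if inner_content.startswith('[') and inner_content.endswith(']'):
--         words_str = inner_content[1:-1]  # Remove brackets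
--
--         # Handle mixed comma and space separation
--         if ',' in words_str:
--             # Split by commas first, then by spaces within each part
--             words = []
--             comma_parts = words_str.split(',')
--             for part in comma_parts:
--                 # Split each comma part by spaces and add all words
--                 space_words = [word.strip() for word in part.split() if word.strip()]
--                 words.extend(space_words)
--         else:
--             # Space-separated: "word word word"
--             words = [word.strip() for word in words_str.split() if word.strip()]
--
--         # Format as list of quoted strings
--         fixed_content = "[" + ", ".join(f"'{word}'" for word in words) + "]"
--     else:
--         # Not in brackets, assume space-separated
--         words = [word.strip() for word in inner_content.split() if word.strip()]
--         fixed_content = "[" + ", ".join(f"'{word}'" for word in words) + "]"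
--
--     return f'"{fixed_content}"'
-- ===== SOURCE B (Python) =====
-- def fix_csv_line(line):
--     line = line.strip()
--     if not line or line.startswith('trial'):
--         return line
--     if "['" in line:  # covers both "[''" and "['" checks of the original
--         return line
--     parts = _split_top(line)
--     if len(parts) < 4:
--         return line
--     return f'{parts[0]},{parts[1]},{_fix_words(parts[2])},{_fix_words(parts[3])}'
--
-- def _split_top(s):
--     """Split at the first unquoted comma and recurse on the rest."""
--     in_quotes = False
--     for i, ch in enumerate(s):
--         if ch == '"':
--             in_quotes = not in_quotes
--         elif ch == ',' and not in_quotes: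
--             return [s[:i].strip()] + _split_top(s[i + 1:])
--     return [s.strip()] if s else []
--
-- def _tokens(s, also_comma):
--     """Maximal runs of characters that are neither whitespace nor (optionally) commas."""
--     words, cur = [], ""
--     for ch in s:
--         if ch.isspace() or (also_comma and ch == ','):
--             if cur:
--                 words.append(cur)
--                 cur = ""
--         else:
--             cur += ch
--     if cur:
--         words.append(cur)
--     return words
--
-- def _fix_words(word_part):
--     word_part = word_part.strip()
--     if word_part.startswith('"') and word_part.endswith('"'):
--         inner = word_part[1:-1]
--     else:
--         inner = word_part
--     if inner.startswith('[') and inner.endswith(']'):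
--         words = _tokens(inner[1:-1], True)
--     else:
--         words = _tokens(inner, False)
--     return '"[' + ", ".join("'" + w + "'" for w in words) + ']"'
-- ===== Notes on version B (the rewrite author's own statement) =====
-- stated objective: simpler
-- what changed: The nested comma-then-whitespace splitting in fix_word_list collapses into one linear scanner collecting maximal runs of non-separator characters (used for both the bracket and non-bracket branches), and the outer accumulate-characters splitter is replaced by a recursive split at the first unquoted comma using slices; the duplicated quoting/formatting code is unified.
import Mathlib
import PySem

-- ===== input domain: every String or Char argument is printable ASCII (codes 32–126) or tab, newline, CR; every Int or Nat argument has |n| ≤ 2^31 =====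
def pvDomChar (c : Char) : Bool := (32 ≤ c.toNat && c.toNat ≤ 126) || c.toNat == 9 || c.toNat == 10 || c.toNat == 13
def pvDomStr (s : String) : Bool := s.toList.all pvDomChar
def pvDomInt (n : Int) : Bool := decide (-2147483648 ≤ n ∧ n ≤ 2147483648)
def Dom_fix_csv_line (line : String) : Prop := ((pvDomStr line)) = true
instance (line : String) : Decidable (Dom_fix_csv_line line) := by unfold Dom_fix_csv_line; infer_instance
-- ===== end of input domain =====

-- B re-implements the same CSV fixer with a flat token-run scanner and a recursive
-- slice-based outer splitter instead of A's nested split/accumulate loops; return value only, no mutation in either.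

-- ===== PORT A =====
-- [word.strip() for word in part.split() if word.strip()]
def pvWordsOf (cs : List Char) : List (List Char) :=
  ((PySem.Chars.split₀ cs).map PySem.Chars.strip).filter (fun w => !w.isEmpty)

-- fix_word_list of A
def pvFixWordList (word_part : List Char) : List Char :=
  let wp := PySem.Chars.strip word_part
  let inner := if PySem.Chars.startswith wp ['"'] && PySem.Chars.endswith wp ['"']
               then PySem.Chars.slice wp (some 1) (some (-1)) else wp
  let fixed :=
    if PySem.Chars.startswith inner ['['] && PySem.Chars.endswith inner [']'] then
      let ws := PySem.Chars.slice inner (some 1) (some (-1))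
      let words :=
        if PySem.Chars.isIn [','] ws then
          (PySem.Chars.splitOn ws [',']).foldl (fun acc part => acc ++ pvWordsOf part) []
        else pvWordsOf ws
      ['['] ++ PySem.Chars.join [',', ' '] (words.map (fun w => '\'' :: w ++ ['\''])) ++ [']']
    else
      ['['] ++ PySem.Chars.join [',', ' ']
        ((pvWordsOf inner).map (fun w => '\'' :: w ++ ['\''])) ++ [']']
  '"' :: fixed ++ ['"']

def fix_csv_line (line : String) : String :=
  let line := PySem.Str.strip line
  if PySem.Str.len line == 0 || PySem.Str.startswith line "trial" then line
  else if PySem.Str.isIn "[''" line || PySem.Str.isIn "['" line then line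
  else
    let st := line.toList.foldl (fun (st : List (List Char) × List Char × Bool) c =>
      if c = '"' then (st.1, st.2.1 ++ [c], !st.2.2)
      else if c = ',' ∧ st.2.2 = false then (st.1 ++ [PySem.Chars.strip st.2.1], [], st.2.2)
      else (st.1, st.2.1 ++ [c], st.2.2)) ([], [], false)
    let parts := if st.2.1.isEmpty then st.1 else st.1 ++ [PySem.Chars.strip st.2.1]
    if parts.length < 4 then line
    else String.ofList (parts.getD 0 [] ++ [','] ++ parts.getD 1 [] ++ [','] ++
      pvFixWordList (parts.getD 2 []) ++ [','] ++ pvFixWordList (parts.getD 3 []))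

-- ===== PORT B =====
-- B's _split_top loop body: find the first unquoted comma, return (before, after)
def pvFirstComma (inq : Bool) : List Char → Option (List Char × List Char)
  | [] => none
  | c :: rest =>
    if c = '"' then (pvFirstComma (!inq) rest).map (fun p => (c :: p.1, p.2))
    else if c = ',' ∧ inq = false then some ([], rest)
    else (pvFirstComma inq rest).map (fun p => (c :: p.1, p.2))

theorem pvFirstComma_snd_lt (inq : Bool) (s b a : List Char)
    (h : pvFirstComma inq s = some (b, a)) : a.length < s.length := by
  induction s generalizing inq b a with
  | nil => simp [pvFirstComma] at h
  | cons c rest ih =>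
    simp only [pvFirstComma] at h
    split_ifs at h with h1 h2
    · cases hr : pvFirstComma (!inq) rest with
      | none => rw [hr] at h; simp at h
      | some p => rw [hr] at h; simp at h; obtain ⟨_, h2⟩ := h
                  have := ih _ _ _ hr; simp [← h2]; omega
    · simp at h; obtain ⟨_, h2⟩ := h; simp [← h2]
    · cases hr : pvFirstComma inq rest with
      | none => rw [hr] at h; simp at h
      | some p => rw [hr] at h; simp at h; obtain ⟨_, h2⟩ := h
                  have := ih _ _ _ hr; simp [← h2]; omega

def pvSplitTop (s : List Char) : List (List Char) :=
  match h : pvFirstComma false s with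
  | some (b, a) => PySem.Chars.strip b :: pvSplitTop a
  | none => if s.isEmpty then [] else [PySem.Chars.strip s]
termination_by s.length
decreasing_by exact pvFirstComma_snd_lt _ _ _ _ h

-- B's _tokens loop
def pvTokGo (wc : Bool) (s : List Char) (words : List (List Char)) (cur : List Char) :
    List (List Char) :=
  match s with
  | [] => if cur.isEmpty then words else words ++ [cur]
  | c :: rest =>
    if PySem.Chars.isspace c || (wc && c == ',') then
      if cur.isEmpty then pvTokGo wc rest words [] else pvTokGo wc rest (words ++ [cur]) []
    else pvTokGo wc rest words (cur ++ [c])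

-- B's _fix_words
def pvFixWordsAlt (word_part : List Char) : List Char :=
  let wp := PySem.Chars.strip word_part
  let inner := if PySem.Chars.startswith wp ['"'] && PySem.Chars.endswith wp ['"']
               then PySem.Chars.slice wp (some 1) (some (-1)) else wp
  let words := if PySem.Chars.startswith inner ['['] && PySem.Chars.endswith inner [']']
               then pvTokGo true (PySem.Chars.slice inner (some 1) (some (-1))) [] []
               else pvTokGo false inner [] []
  '"' :: '[' :: PySem.Chars.join [',', ' '] (words.map (fun w => '\'' :: w ++ ['\''])) ++ [']', '"']

def fix_csv_line_alt (line : String) : String :=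
  let line := PySem.Str.strip line
  if PySem.Str.len line == 0 || PySem.Str.startswith line "trial" then line
  else if PySem.Str.isIn "['" line then line
  else
    let parts := pvSplitTop line.toList
    if parts.length < 4 then line
    else String.ofList (parts.getD 0 [] ++ [','] ++ parts.getD 1 [] ++ [','] ++
      pvFixWordsAlt (parts.getD 2 []) ++ [','] ++ pvFixWordsAlt (parts.getD 3 []))

-- ===== PRECONDITION & SPEC =====
def Spec_fix_csv_line (line : String) (out : String) : Prop := out = fix_csv_line_alt line
instance (line : String) (out : String) : Decidable (Spec_fix_csv_line line out) := by
  unfold Spec_fix_csv_line; infer_instance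

-- ===== CLAIM (what is proved, stated in full; the proofs are below) =====
def Claim_equal_fix_csv_line : Prop :=
  ∀ (line : String), Dom_fix_csv_line line → Spec_fix_csv_line line (fix_csv_line line)

-- ===== LEMMAS AND PROOFS =====

-- token-run spec shared by both sides
def pvSep (wc : Bool) (c : Char) : Bool := PySem.Chars.isspace c || (wc && c == ',')

def pvConsume (wc : Bool) (cur : List Char) : List Char → List (List Char)
  | [] => if cur.isEmpty then [] else [cur]
  | c :: rest =>
    if pvSep wc c then
      (if cur.isEmpty then pvConsume wc [] rest else cur :: pvConsume wc [] rest)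
    else pvConsume wc (cur ++ [c]) rest

theorem pvTokGo_eq (wc : Bool) (s : List Char) (words : List (List Char)) (cur : List Char) :
    pvTokGo wc s words cur = words ++ pvConsume wc cur s := by
  induction s generalizing words cur with
  | nil => simp [pvTokGo, pvConsume]; split_ifs <;> simp
  | cons c rest ih =>
    simp only [pvTokGo, pvConsume, pvSep]
    split_ifs with h1 h2 <;> simp [ih]

theorem split₀_go_eq (s cur acc) :
    PySem.Chars.split₀.go s cur acc = acc.reverse ++ pvConsume false cur.reverse s := by
  induction s generalizing cur acc with
  | nil =>
    simp only [PySem.Chars.split₀.go, pvConsume]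
    split_ifs with h1 h2 h2 <;> simp_all
  | cons c rest ih =>
    simp only [PySem.Chars.split₀.go, pvConsume, pvSep]
    split_ifs with h1 h2 h2 <;> simp_all

theorem split₀_eq (s : List Char) : PySem.Chars.split₀ s = pvConsume false [] s := by
  simpa using split₀_go_eq s [] []

theorem dropWhile_of_all_false (p : Char → Bool) (l : List Char) (h : ∀ c ∈ l, p c = false) :
    l.dropWhile p = l := by
  cases l with
  | nil => rfl
  | cons c t => simp [h c (by simp)]

theorem strip_of_no_space (w : List Char) (h : ∀ c ∈ w, PySem.Chars.isspace c = false) :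
    PySem.Chars.strip w = w := by
  simp only [PySem.Chars.strip, PySem.Chars.lstrip, PySem.Chars.rstrip]
  rw [dropWhile_of_all_false _ _ h, dropWhile_of_all_false, List.reverse_reverse]
  intro c hc; exact h c (by simpa using hc)

theorem pvConsume_mem (wc : Bool) (s cur : List Char) (hcur : ∀ c ∈ cur, pvSep wc c = false) :
    ∀ w ∈ pvConsume wc cur s, w ≠ [] ∧ ∀ c ∈ w, pvSep wc c = false := by
  induction s generalizing cur with
  | nil =>
    simp only [pvConsume]
    split_ifs with h1
    · simp
    · intro w hw; simp at hw; subst hw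
      exact ⟨by simpa [List.isEmpty_iff] using h1, hcur⟩
  | cons c rest ih =>
    simp only [pvConsume]
    split_ifs with h1 h2
    · exact ih [] (by simp)
    · intro w hw
      cases hw with
      | head => exact ⟨by simpa [List.isEmpty_iff] using h2, hcur⟩
      | tail _ hw => exact ih [] (by simp) w hw
    · exact ih (cur ++ [c]) (by intro d hd; rcases List.mem_append.1 hd with h | h
                                · exact hcur d h
                                · simp at h; subst h; simpa using h1)

theorem filter_map_strip_id (L : List (List Char))
    (h : ∀ w ∈ L, w ≠ [] ∧ ∀ c ∈ w, PySem.Chars.isspace c = false) :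
    (L.map PySem.Chars.strip).filter (fun w => !w.isEmpty) = L := by
  induction L with
  | nil => rfl
  | cons w t ih =>
    have hw := h w (by simp)
    have hs : PySem.Chars.strip w = w := strip_of_no_space w hw.2
    simp only [List.map_cons, List.filter_cons, hs]
    rw [ih (fun v hv => h v (by simp [hv]))]
    simp [hw.1]

theorem pvWordsOf_eq (s : List Char) : pvWordsOf s = pvConsume false [] s := by
  unfold pvWordsOf
  rw [split₀_eq]
  apply filter_map_strip_id
  intro w hw
  have hm := pvConsume_mem false s [] (by simp) w hw
  refine ⟨hm.1, fun c hc => ?_⟩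
  have := hm.2 c hc
  simpa [pvSep] using this

-- comma-splitting spec of splitOn · [','], keeping empty pieces
def pvSplitC : List Char → List (List Char)
  | [] => [[]]
  | c :: rest => if c = ',' then [] :: pvSplitC rest else (pvSplitC rest).modifyHead (c :: ·)

theorem pvSplitC_ne_nil (s : List Char) : pvSplitC s ≠ [] := by
  cases s with
  | nil => simp [pvSplitC]
  | cons c rest =>
    simp only [pvSplitC]
    split_ifs
    · simp
    · cases h : pvSplitC rest with
      | nil => exact absurd h (pvSplitC_ne_nil rest)
      | cons a t => simp

theorem splitOn_go_eq' (fuel : Nat) : ∀ (l cur : List Char) (acc : List (List Char)),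
    l.length ≤ fuel →
    PySem.Chars.splitOn.go [','] fuel l cur acc =
      acc.reverse ++ (pvSplitC l).modifyHead (cur.reverse ++ ·) := by
  induction fuel with
  | zero =>
    intro l cur acc hl
    have : l = [] := by cases l <;> simp_all
    subst this
    simp [PySem.Chars.splitOn.go, pvSplitC]
  | succ fuel ih =>
    intro l cur acc hl
    cases l with
    | nil => simp [PySem.Chars.splitOn.go, pvSplitC]
    | cons c rest =>
      simp only [PySem.Chars.splitOn.go]
      by_cases hc : c = ','
      · subst hc
        rw [if_pos (by simp [List.isPrefixOf])]
        simp only [List.length_cons] at hl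
        rw [ih _ _ _ (by simpa using hl)]
        cases h : pvSplitC rest with
        | nil => exact absurd h (pvSplitC_ne_nil rest)
        | cons a t => simp [pvSplitC, h]
      · rw [if_neg (by simp only [List.isPrefixOf, Bool.and_true,
            beq_iff_eq]; exact fun h => hc h.symm)]
        simp only [List.length_cons] at hl
        rw [ih _ _ _ (by omega)]
        simp only [pvSplitC, if_neg hc]
        cases h : pvSplitC rest with
        | nil => exact absurd h (pvSplitC_ne_nil rest)
        | cons a t => simp

theorem splitOn_comma_eq (s : List Char) : PySem.Chars.splitOn s [','] = pvSplitC s := by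
  unfold PySem.Chars.splitOn
  rw [splitOn_go_eq' _ _ _ _ (by omega)]
  cases h : pvSplitC s with
  | nil => exact absurd h (pvSplitC_ne_nil s)
  | cons a t => simp

theorem pvConsume_true_eq (s : List Char) : ∀ cur,
    pvConsume true cur s =
      pvConsume false cur ((pvSplitC s).headI) ++
        ((pvSplitC s).tail).flatMap (pvConsume false []) := by
  induction s with
  | nil => intro cur; simp [pvSplitC, pvConsume]
  | cons c rest ih =>
    intro cur
    obtain ⟨a, t, hat⟩ : ∃ a t, pvSplitC rest = a :: t := by
      cases h : pvSplitC rest with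
      | nil => exact absurd h (pvSplitC_ne_nil rest)
      | cons a t => exact ⟨a, t, rfl⟩
    have ih' : ∀ cur, pvConsume true cur rest =
        pvConsume false cur a ++ t.flatMap (pvConsume false []) := by
      intro cur; rw [ih cur, hat]; rfl
    by_cases hc : c = ','
    · subst hc
      have hspl : pvSplitC (',' :: rest) = [] :: a :: t := by simp [pvSplitC, hat]
      rw [hspl]
      have hsep : pvSep true ',' = true := by decide
      simp only [List.headI, List.tail, List.flatMap_cons, pvConsume, hsep, if_true]
      split_ifs with h1 <;> simp [ih' []]
    · have hspl : pvSplitC (c :: rest) = (c :: a) :: t := by simp [pvSplitC, hc, hat]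
      rw [hspl]
      have hsepeq : pvSep true c = pvSep false c := by simp [pvSep, hc]
      simp only [List.headI, List.tail]
      by_cases hs : pvSep false c = true
      · simp only [pvConsume, hsepeq, hs, if_true]
        split_ifs with h1 <;> simp [ih' []]
      · simp only [pvConsume, hsepeq, hs, if_false, Bool.false_eq_true]
        exact ih' (cur ++ [c])

theorem pvConsume_true_flat (s : List Char) :
    pvConsume true [] s = (pvSplitC s).flatMap (pvConsume false []) := by
  rw [pvConsume_true_eq s []]
  cases h : pvSplitC s with
  | nil => exact absurd h (pvSplitC_ne_nil s)
  | cons a t => simp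

theorem pvConsume_no_comma (s : List Char) (hs : ',' ∉ s) : ∀ cur,
    pvConsume true cur s = pvConsume false cur s := by
  induction s with
  | nil => intro cur; rfl
  | cons c rest ih =>
    intro cur
    have hc : c ≠ ',' := fun h => hs (by simp [h])
    have hrest : ',' ∉ rest := fun h => hs (by simp [h])
    have hsepeq : pvSep true c = pvSep false c := by simp [pvSep, hc]
    simp only [pvConsume, hsepeq]
    split_ifs <;> simp [ih hrest]

theorem fix_word_list_eq (wp : List Char) : pvFixWordList wp = pvFixWordsAlt wp := by
  unfold pvFixWordList pvFixWordsAlt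
  simp only []
  set inner := if PySem.Chars.startswith (PySem.Chars.strip wp) ['"'] &&
      PySem.Chars.endswith (PySem.Chars.strip wp) ['"']
    then PySem.Chars.slice (PySem.Chars.strip wp) (some 1) (some (-1))
    else PySem.Chars.strip wp with hinner
  by_cases hb : (PySem.Chars.startswith inner ['['] && PySem.Chars.endswith inner [']']) = true
  · rw [if_pos hb, if_pos hb]
    set ws := PySem.Chars.slice inner (some 1) (some (-1)) with hws
    have hwords : (if PySem.Chars.isIn [','] ws then
          (PySem.Chars.splitOn ws [',']).foldl (fun acc part => acc ++ pvWordsOf part) []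
        else pvWordsOf ws) = pvTokGo true ws [] [] := by
      rw [pvTokGo_eq]
      split_ifs with hcomma
      · rw [PySem.List.foldl_append_eq_flatMap, splitOn_comma_eq]
        simp only [show pvWordsOf = pvConsume false [] from funext pvWordsOf_eq]
        rw [← pvConsume_true_flat]
      · rw [pvWordsOf_eq]
        have hnc : ',' ∉ ws := by
          intro hmem
          have : PySem.Chars.isIn [','] ws = true := by
            rw [PySem.Chars.isIn_iff_infix, List.singleton_infix_iff]; exact hmem
          simp [this] at hcomma
        simp [pvConsume_no_comma ws hnc []]
    rw [hwords]; simp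
  · rw [if_neg hb, if_neg hb]
    rw [pvTokGo_eq, pvWordsOf_eq]; simp

-- outer splitter: A's fold equals a direct recursion …
def pvConsumeTop (cur : List Char) (inq : Bool) : List Char → List (List Char)
  | [] => if cur.isEmpty then [] else [PySem.Chars.strip cur]
  | c :: rest =>
    if c = '"' then pvConsumeTop (cur ++ [c]) (!inq) rest
    else if c = ',' ∧ inq = false then PySem.Chars.strip cur :: pvConsumeTop [] inq rest
    else pvConsumeTop (cur ++ [c]) inq rest

def pvStepA (st : List (List Char) × List Char × Bool) (c : Char) :
    List (List Char) × List Char × Bool :=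
  if c = '"' then (st.1, st.2.1 ++ [c], !st.2.2)
  else if c = ',' ∧ st.2.2 = false then (st.1 ++ [PySem.Chars.strip st.2.1], [], st.2.2)
  else (st.1, st.2.1 ++ [c], st.2.2)

theorem foldA_eq (s : List Char) : ∀ (parts : List (List Char)) (cur : List Char) (inq : Bool),
    (if (s.foldl pvStepA (parts, cur, inq)).2.1.isEmpty
     then (s.foldl pvStepA (parts, cur, inq)).1
     else (s.foldl pvStepA (parts, cur, inq)).1 ++
       [PySem.Chars.strip (s.foldl pvStepA (parts, cur, inq)).2.1]) =
    parts ++ pvConsumeTop cur inq s := by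
  induction s with
  | nil =>
    intro parts cur inq
    simp only [List.foldl_nil, pvConsumeTop]
    split_ifs <;> simp
  | cons c rest ih =>
    intro parts cur inq
    simp only [List.foldl_cons, pvConsumeTop]
    by_cases h1 : c = '"'
    · rw [show pvStepA (parts, cur, inq) c = (parts, cur ++ [c], !inq) from by
        simp [pvStepA, h1]]
      rw [if_pos h1, ih]
    · by_cases h2 : c = ',' ∧ inq = false
      · rw [show pvStepA (parts, cur, inq) c = (parts ++ [PySem.Chars.strip cur], [], inq) from by
          simp [pvStepA, h2]]
        rw [if_neg h1, if_pos h2, ih]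
        simp
      · rw [show pvStepA (parts, cur, inq) c = (parts, cur ++ [c], inq) from by
          simp [pvStepA, h1, h2]]
        rw [if_neg h1, if_neg h2, ih]

-- … and that recursion equals B's first-comma recursion
theorem pvConsumeTop_firstComma (s : List Char) : ∀ (inq : Bool) (cur : List Char),
    pvConsumeTop cur inq s =
      (match pvFirstComma inq s with
       | some (b, a) => PySem.Chars.strip (cur ++ b) :: pvConsumeTop [] false a
       | none => if (cur ++ s).isEmpty then [] else [PySem.Chars.strip (cur ++ s)]) := by
  induction s with
  | nil => intro inq cur; simp [pvConsumeTop, pvFirstComma]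
  | cons c rest ih =>
    intro inq cur
    by_cases h1 : c = '"'
    · subst h1
      simp only [pvConsumeTop, pvFirstComma]
      rw [ih (!inq) (cur ++ ['"'])]
      cases h : pvFirstComma (!inq) rest with
      | none => simp [List.isEmpty_iff]
      | some p => obtain ⟨b, a⟩ := p; simp
    · by_cases h2 : c = ',' ∧ inq = false
      · obtain ⟨hc, hq⟩ := h2; subst hc; subst hq
        simp [pvConsumeTop, pvFirstComma, h1]
      · simp only [pvConsumeTop, pvFirstComma, if_neg h1, if_neg h2]
        rw [ih inq (cur ++ [c])]
        cases h : pvFirstComma inq rest with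
        | none => simp [List.isEmpty_iff]
        | some p => obtain ⟨b, a⟩ := p; simp

theorem pvConsumeTop_eq_splitTop (s : List Char) :
    pvConsumeTop [] false s = pvSplitTop s := by
  rw [pvConsumeTop_firstComma s false [], pvSplitTop]
  cases h : pvFirstComma false s with
  | none => simp
  | some p =>
    obtain ⟨b, a⟩ := p
    simp only [List.nil_append]
    rw [pvConsumeTop_eq_splitTop a]
termination_by s.length
decreasing_by exact pvFirstComma_snd_lt _ _ _ _ h

theorem isIn_guard (line : String) :
    (PySem.Str.isIn "[''" line || PySem.Str.isIn "['" line) = PySem.Str.isIn "['" line := by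
  by_cases h : PySem.Str.isIn "['" line = true
  · rw [h, Bool.or_true]
  · have h2 : PySem.Str.isIn "[''" line = false := by
      rw [Bool.eq_false_iff]
      intro habs
      apply h
      rw [PySem.Str.isIn_iff_infix] at habs ⊢
      exact List.IsInfix.trans (by decide) habs
    rw [h2, Bool.false_or]

-- ===== VERDICT (by name: the statement is the Claim_ definition above) =====
theorem fix_csv_line_spec : Claim_equal_fix_csv_line := by
  intro line _
  show fix_csv_line line = fix_csv_line_alt line
  simp only [fix_csv_line, fix_csv_line_alt]
  rw [isIn_guard]
  by_cases h1 : (PySem.Str.len (PySem.Str.strip line) == 0 ||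
      PySem.Str.startswith (PySem.Str.strip line) "trial") = true
  · rw [if_pos h1, if_pos h1]
  · rw [if_neg h1, if_neg h1]
    by_cases h2 : PySem.Str.isIn "['" (PySem.Str.strip line) = true
    · rw [if_pos h2, if_pos h2]
    · rw [if_neg h2, if_neg h2]
      rw [show (fun (st : List (List Char) × List Char × Bool) c =>
          if c = '"' then (st.1, st.2.1 ++ [c], !st.2.2)
          else if c = ',' ∧ st.2.2 = false then (st.1 ++ [PySem.Chars.strip st.2.1], [], st.2.2)
          else (st.1, st.2.1 ++ [c], st.2.2)) = pvStepA from rfl]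
      rw [foldA_eq (PySem.Str.strip line).toList [] [] false]
      rw [List.nil_append, pvConsumeTop_eq_splitTop]
      rw [show pvFixWordList = pvFixWordsAlt from funext fix_word_list_eq]
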